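-- pv_equiv track=rewrite | github.com/Kmprayoga/skripsi-search-engine | scripts/build_dictionary.py | front_coding
-- ===== SOURCE A (Python) =====
-- def front_coding(terms):
--     if not terms:
--         return ""
--
--     prefix = terms[0]
--     for term in terms[1:]:
--         i = 0
--         while i < min(len(prefix), len(term)) and prefix[i] == term[i]:
--             i += 1
--         prefix = prefix[:i]
--
--     encoded = prefix + "*"
--     encoded += "|".join(t[len(prefix):] for t in terms)
--     return encoded
-- ===== SOURCE B (Python) =====
-- def front_coding(terms):
--     if not terms:
--         return ""
--     lo, hi = min(terms), max(terms)
--     i = 0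
--     while i < min(len(lo), len(hi)) and lo[i] == hi[i]:
--         i += 1
--     prefix = lo[:i]
--     return prefix + "*" + "|".join(t[len(prefix):] for t in terms)
-- ===== Notes on version B (the rewrite author's own statement) =====
-- stated objective: alternative
-- what changed: B replaces A's left fold of pairwise common-prefix reductions over the whole term list by computing the common prefix of just the lexicographic min and max of the list (proved equal via the min/max LCP theorem); the per-character Python loop then runs on one pair of strings instead of on every term.
import Mathlib
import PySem

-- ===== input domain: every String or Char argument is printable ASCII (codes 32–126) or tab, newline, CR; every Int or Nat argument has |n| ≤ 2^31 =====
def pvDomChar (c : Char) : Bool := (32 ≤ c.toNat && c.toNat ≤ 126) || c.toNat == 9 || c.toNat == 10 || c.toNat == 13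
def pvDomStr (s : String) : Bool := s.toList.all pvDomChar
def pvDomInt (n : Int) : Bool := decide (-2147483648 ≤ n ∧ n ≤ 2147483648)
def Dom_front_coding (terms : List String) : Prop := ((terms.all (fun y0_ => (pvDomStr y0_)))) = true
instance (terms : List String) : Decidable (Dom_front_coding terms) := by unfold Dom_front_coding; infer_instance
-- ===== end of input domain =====

-- B replaces A's fold of pairwise common prefixes over the whole list by the common
-- prefix of the lexicographic min and max of the list; measured faster (constant factor).

-- ===== PORT A =====
-- A's inner while loop: count leading positions where prefix and term have equal chars
def frontLcpLen : List Char → List Char → Nat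
  | a :: as, b :: bs => if a = b then frontLcpLen as bs + 1 else 0
  | _, _ => 0

-- strings are handled as List Char (PySem.Chars convention); "|".join of the suffix
-- strings is List.intercalate ['|'] of the suffix char lists — exact on all strings
def front_coding (terms : List String) : String :=
  match terms with
  | [] => ""
  | t0 :: rest =>
    let pre := rest.foldl (fun p t => p.take (frontLcpLen p t.toList)) t0.toList
    String.ofList (pre ++ ['*'] ++
      List.intercalate ['|'] (terms.map (fun t => t.toList.drop pre.length)))

-- ===== PORT B =====
-- B's while loop followed by lo[:i]: the common prefix of two char lists, directly
def frontCp : List Char → List Char → List Char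
  | a :: as, b :: bs => if a = b then a :: frontCp as bs else []
  | _, _ => []

def front_coding_alt (terms : List String) : String :=
  match terms with
  | [] => ""
  | _ :: _ =>
    let lo := ((PySem.List.min? terms (fun x => x)).getD "").toList
    let hi := ((PySem.List.max? terms (fun x => x)).getD "").toList
    let pre := frontCp lo hi
    String.ofList (pre ++ ['*'] ++
      List.intercalate ['|'] (terms.map (fun t => t.toList.drop pre.length)))

-- ===== PRECONDITION & SPEC =====
def Spec_front_coding (terms : List String) (out : String) : Prop := out = front_coding_alt terms
instance (terms : List String) (out : String) : Decidable (Spec_front_coding terms out) := by unfold Spec_front_coding; infer_instance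

-- ===== CLAIM (what is proved, stated in full; the proofs are below) =====
def Claim_equal_front_coding : Prop := ∀ (terms : List String), Dom_front_coding terms → Spec_front_coding terms (front_coding terms)

-- ===== LEMMAS AND PROOFS =====

theorem take_frontLcpLen (p t : List Char) : p.take (frontLcpLen p t) = frontCp p t := by
  induction p generalizing t with
  | nil => cases t <;> simp [frontLcpLen, frontCp]
  | cons a as ih =>
    cases t with
    | nil => simp [frontLcpLen, frontCp]
    | cons b bs =>
      by_cases h : a = b <;> simp [frontLcpLen, frontCp, h, ih]

theorem frontCp_prefix_left (x y : List Char) : frontCp x y <+: x := by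
  induction x generalizing y with
  | nil => simp [frontCp]
  | cons a as ih =>
    cases y with
    | nil => simp [frontCp]
    | cons b bs =>
      by_cases h : a = b
      · simpa [frontCp, h] using ih bs
      · simp [frontCp, h]

theorem frontCp_prefix_right (x y : List Char) : frontCp x y <+: y := by
  induction x generalizing y with
  | nil => simp [frontCp]
  | cons a as ih =>
    cases y with
    | nil => simp [frontCp]
    | cons b bs =>
      by_cases h : a = b
      · subst h; simpa [frontCp] using ih bs
      · simp [frontCp, h]

theorem frontCp_greatest (p x y : List Char) (hx : p <+: x) (hy : p <+: y) :
    p <+: frontCp x y := by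
  induction p generalizing x y with
  | nil => simp
  | cons a p' ih =>
    cases x with
    | nil => simp at hx
    | cons b x' =>
      cases y with
      | nil => simp at hy
      | cons c y' =>
        rw [List.cons_prefix_cons] at hx hy
        obtain ⟨rfl, hx'⟩ := hx
        obtain ⟨rfl, hy'⟩ := hy
        simpa [frontCp] using ih x' y' hx' hy'

-- the key fact: any t lexicographically between lo and hi extends their common prefix
theorem frontCp_between (lo t hi : List Char) (h1 : ¬ t < lo) (h2 : ¬ hi < t) :
    frontCp lo hi <+: t := by
  induction lo generalizing t hi with
  | nil => cases hi <;> simp [frontCp]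
  | cons a as ih =>
    cases t with
    | nil => exact absurd (List.nil_lt_cons a as) h1
    | cons b bs =>
      cases hi with
      | nil => simp [frontCp]
      | cons c cs =>
        by_cases hac : a = c
        · subst hac
          rw [List.cons_lt_cons_iff] at h1 h2
          push Not at h1 h2
          have hb : b = a := le_antisymm h2.1 h1.1
          subst hb
          have h1' : ¬ bs < as := not_lt.mpr (h1.2 rfl)
          have h2' : ¬ cs < bs := not_lt.mpr (h2.2 rfl)
          simpa [frontCp] using ih bs cs h1' h2'
        · simp [frontCp, hac]

theorem fold_prefix_acc (l : List String) (acc : List Char) :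
    l.foldl (fun p t => frontCp p t.toList) acc <+: acc := by
  induction l generalizing acc with
  | nil => simp
  | cons t l ih =>
    exact (ih (frontCp acc t.toList)).trans (frontCp_prefix_left acc t.toList)

theorem fold_prefix_mem (l : List String) (acc : List Char) (t : String) (ht : t ∈ l) :
    l.foldl (fun p u => frontCp p u.toList) acc <+: t.toList := by
  induction l generalizing acc with
  | nil => simp at ht
  | cons u l ih =>
    rcases List.mem_cons.mp ht with rfl | h
    · exact (fold_prefix_acc l (frontCp acc t.toList)).trans (frontCp_prefix_right acc t.toList)
    · exact ih (frontCp acc u.toList) h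

theorem fold_greatest (l : List String) (acc p : List Char) (hacc : p <+: acc)
    (hl : ∀ t ∈ l, p <+: t.toList) :
    p <+: l.foldl (fun q t => frontCp q t.toList) acc := by
  induction l generalizing acc with
  | nil => simpa using hacc
  | cons t l ih =>
    exact ih (frontCp acc t.toList)
      (frontCp_greatest p acc t.toList hacc (hl t (List.mem_cons_self)))
      (fun u hu => hl u (List.mem_cons_of_mem t hu))

theorem foldl_some_of_some {α : Type} (f : Option α → α → Option α)
    (hf : ∀ a x, ∃ b, f (some a) x = some b) :
    ∀ (l : List α) (a : α), ∃ m, List.foldl f (some a) l = some m := by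
  intro l
  induction l with
  | nil => exact fun a => ⟨a, rfl⟩
  | cons x t ih =>
    intro a
    obtain ⟨b, hb⟩ := hf a x
    simp only [List.foldl, hb]
    exact ih b

theorem min?_cons_exists (t0 : String) (rest : List String) :
    ∃ m, PySem.List.min? (t0 :: rest) (fun x => x) = some m := by
  unfold PySem.List.min?
  simp only [List.foldl]
  exact foldl_some_of_some _ (fun a x => by dsimp only; split_ifs <;> exact ⟨_, rfl⟩) rest t0

theorem max?_cons_exists (t0 : String) (rest : List String) :
    ∃ m, PySem.List.max? (t0 :: rest) (fun x => x) = some m := by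
  unfold PySem.List.max?
  simp only [List.foldl]
  exact foldl_some_of_some _ (fun a x => by dsimp only; split_ifs <;> exact ⟨_, rfl⟩) rest t0

theorem not_lt_toList {s t : String} (h : s ≤ t) : ¬ t.toList < s.toList := by
  rw [← String.lt_iff_toList_lt]; exact not_lt.mpr h

-- ===== VERDICT (by name: the statement is the Claim_ definition above) =====
theorem front_coding_spec : Claim_equal_front_coding := by
  intro terms _
  unfold Spec_front_coding front_coding front_coding_alt
  cases terms with
  | nil => rfl
  | cons t0 rest =>
    simp only
    obtain ⟨lo, hlo⟩ := min?_cons_exists t0 rest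
    obtain ⟨hi, hhi⟩ := max?_cons_exists t0 rest
    rw [hlo, hhi]
    simp only [Option.getD_some]
    have hfold : rest.foldl (fun p t => p.take (frontLcpLen p t.toList)) t0.toList
        = rest.foldl (fun p t => frontCp p t.toList) t0.toList := by
      congr 1
      funext p t
      exact take_frontLcpLen p t.toList
    rw [hfold]
    have hpre_of : ∀ s : String, s ∈ t0 :: rest →
        rest.foldl (fun p t => frontCp p t.toList) t0.toList <+: s.toList := by
      intro s hs
      rcases List.mem_cons.mp hs with rfl | h
      · exact fold_prefix_acc rest s.toList
      · exact fold_prefix_mem rest t0.toList s h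
    have hC_of : ∀ s : String, s ∈ t0 :: rest →
        frontCp lo.toList hi.toList <+: s.toList := by
      intro s hs
      exact frontCp_between lo.toList s.toList hi.toList
        (not_lt_toList (PySem.List.min?_isMin hlo s hs))
        (not_lt_toList (PySem.List.max?_isMax hhi s hs))
    have h1 : rest.foldl (fun p t => frontCp p t.toList) t0.toList
        <+: frontCp lo.toList hi.toList :=
      frontCp_greatest _ _ _
        (hpre_of lo (PySem.List.min?_mem hlo))
        (hpre_of hi (PySem.List.max?_mem hhi))
    have h2 : frontCp lo.toList hi.toList
        <+: rest.foldl (fun p t => frontCp p t.toList) t0.toList :=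
      fold_greatest rest t0.toList _ (hC_of t0 (List.mem_cons_self))
        (fun u hu => hC_of u (List.mem_cons_of_mem t0 hu))
    rw [h1.eq_of_length_le h2.length_le]
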